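-- pv_equiv track=rewrite | github.com/MANRENYIBU/Three-lines | 动态规划/LC - 1745. 分割回文串 IV.py | palindromePartition
-- ===== SOURCE A (Python) =====
-- def palindromePartition(s: str, k: int) -> int:
--     n = len(s)
--     min_change = []
--     for _ in range(n):
--         min_change.append([0] * n)
--     for i in range(n - 2, -1, -1):
--         for j in range(i + 1, n):
--             if s[i] != s[j]:
--                 min_change[i][j] = min_change[i + 1][j - 1] + 1
--             else:
--                 min_change[i][j] = min_change[i + 1][j - 1]
--
--     f = min_change[0]
--     for i in range(1, k):
--         for r in range(n - k + i, i - 1, -1):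
--             ans = []
--             for l in range(i, r + 1):
--                 temp = f[l - 1] + min_change[l][r]
--                 ans.append(temp)
--             f[r] = min(ans)
--     return f[-1]
-- ===== SOURCE B (Python) =====
-- def palindromePartition(s: str, k: int) -> int:
--     n = len(s)
--     min_change = []
--     for _ in range(n):
--         min_change.append([0] * n)
--     for i in range(n - 2, -1, -1):
--         for j in range(i + 1, n):
--             min_change[i][j] = min_change[i + 1][j - 1] + (1 if s[i] != s[j] else 0)
--
--     memo = {}
--
--     def solve(r, parts):
--         # min changes to make s[0..r] a concatenation of `parts` palindromes
--         if parts <= 1: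
--             return min_change[0][r]
--         if (r, parts) in memo:
--             return memo[(r, parts)]
--         best = min(solve(l - 1, parts - 1) + min_change[l][r]
--                    for l in range(parts - 1, r + 1))
--         memo[(r, parts)] = best
--         return best
--
--     return solve(n - 1, k)
-- ===== Notes on version B (the rewrite author's own statement) =====
-- stated objective: alternative
-- what changed: A's compressed in-place 1D bottom-up partition DP (overwriting one row over shrinking index windows) is replaced by top-down memoized recursion solve(r, parts) = min changes to split s[0..r] into `parts` palindromes, over the same interval-DP cost matrix.
-- outside the precondition, e.g. on palindromePartition('ab', 5): A returns 1, B raises ValueError; on palindromePartition('', 2): A raises IndexError, B raises ValueError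
import Mathlib
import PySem

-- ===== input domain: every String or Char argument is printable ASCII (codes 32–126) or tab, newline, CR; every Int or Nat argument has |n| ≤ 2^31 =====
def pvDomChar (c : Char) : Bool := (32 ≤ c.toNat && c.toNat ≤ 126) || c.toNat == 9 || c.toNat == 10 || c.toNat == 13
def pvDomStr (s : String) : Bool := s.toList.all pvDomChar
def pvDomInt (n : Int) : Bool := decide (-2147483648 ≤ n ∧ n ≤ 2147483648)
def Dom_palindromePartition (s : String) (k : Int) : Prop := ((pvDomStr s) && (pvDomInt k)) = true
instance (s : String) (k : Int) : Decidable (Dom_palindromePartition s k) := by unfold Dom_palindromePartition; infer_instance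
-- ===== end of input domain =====

-- B replaces A's compressed in-place bottom-up 1D partition DP with top-down recursion
-- solve(r, parts) over the same palindrome-cost matrix (memoized in Python); same asymptotic cost.

-- shared helpers: list read/write with Python index semantics (all write indices here are ≥ 0)
def pvGet (f : List Int) (j : Int) : Int := PySem.List.pyGetD f j 0
def pvRow (m : List (List Int)) (i : Int) : List Int := PySem.List.pyGetD m i []
def pvMget (m : List (List Int)) (i j : Int) : Int := pvGet (pvRow m i) j
def pvSet (f : List Int) (j : Int) (v : Int) : List Int := f.set j.toNat v
def pvMset (m : List (List Int)) (i j : Int) (v : Int) : List (List Int) :=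
  m.set i.toNat (pvSet (pvRow m i) j v)

-- ===== PORT A =====
-- phase 1 of A: the interval-DP cost matrix (if/else statement form)
def pvBuildA (cs : List Char) : List (List Int) :=
  (PySem.List.pyRange ((cs.length : Int) - 2) (-1) (-1)).foldl (fun m i =>
    (PySem.List.pyRange (i+1) (cs.length : Int) 1).foldl (fun m j =>
      if PySem.List.pyGetD cs i ' ' ≠ PySem.List.pyGetD cs j ' ' then
        pvMset m i j (pvMget m (i+1) (j-1) + 1)
      else
        pvMset m i j (pvMget m (i+1) (j-1))) m)
    ((PySem.List.pyRange 0 (cs.length : Int) 1).foldl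
      (fun acc _ => acc ++ [List.replicate cs.length (0:Int)]) [])

def palindromePartition (s : String) (k : Int) : Int :=
  let cs := s.toList
  let n : Int := cs.length
  let mc := pvBuildA cs
  let f0 := pvRow mc 0
  let f := (PySem.List.pyRange 1 k 1).foldl (fun f i =>
    (PySem.List.pyRange (n-k+i) (i-1) (-1)).foldl (fun f r =>
      let ans := (PySem.List.pyRange i (r+1) 1).foldl
        (fun ans l => ans ++ [pvGet f (l-1) + pvMget mc l r]) []
      pvSet f r ((PySem.List.min? ans (fun x => x)).getD 0)) f) f0
  pvGet f (-1)

-- ===== PORT B =====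
-- phase 1 of B: the same cost matrix (conditional-expression form)
def pvBuildB (cs : List Char) : List (List Int) :=
  (PySem.List.pyRange ((cs.length : Int) - 2) (-1) (-1)).foldl (fun m i =>
    (PySem.List.pyRange (i+1) (cs.length : Int) 1).foldl (fun m j =>
      pvMset m i j (pvMget m (i+1) (j-1) +
        (if PySem.List.pyGetD cs i ' ' ≠ PySem.List.pyGetD cs j ' ' then 1 else 0))) m)
    ((PySem.List.pyRange 0 (cs.length : Int) 1).foldl
      (fun acc _ => acc ++ [List.replicate cs.length (0:Int)]) [])

-- solve(r, parts): min changes making s[0..r] a concatenation of `parts` palindromes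
-- (Source B memoizes this recursion; memoization does not change the computed values)
def pvSolve (mc : List (List Int)) (r : Int) (parts : Int) : Int :=
  if parts ≤ 1 then pvMget mc 0 r
  else
    (PySem.List.min? ((PySem.List.pyRange (parts-1) (r+1) 1).map
      (fun l => pvSolve mc (l-1) (parts-1) + pvMget mc l r)) (fun x => x)).getD 0
termination_by parts.toNat
decreasing_by omega

def palindromePartition_alt (s : String) (k : Int) : Int :=
  let cs := s.toList
  let n : Int := cs.length
  let mc := pvBuildB cs
  pvSolve mc (n-1) k

-- ===== PRECONDITION & SPEC =====
-- Pre_ excludes the empty string, where A raises IndexError, and k > len(s), which is outside the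
-- task's natural domain (a string of n characters cannot be split into more than n nonempty
-- palindromes; the original problem guarantees 1 ≤ k ≤ len(s)): there B's min() over an empty range
-- of split points raises ValueError, while A falls through to the k = 1 answer.
def Pre_palindromePartition (s : String) (k : Int) : Prop :=
  1 ≤ PySem.Str.len s ∧ k ≤ PySem.Str.len s
instance (s : String) (k : Int) : Decidable (Pre_palindromePartition s k) := by
  unfold Pre_palindromePartition; infer_instance

def pvWitness_palindromePartition : String × Int := ("ab", 2)

def Spec_palindromePartition (s : String) (k : Int) (out : Int) : Prop := out = palindromePartition_alt s k
instance (s : String) (k : Int) (out : Int) : Decidable (Spec_palindromePartition s k out) := by unfold Spec_palindromePartition; infer_instance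

-- ===== CLAIM (what is proved, stated in full; the proofs are below) =====
def Claim_equal_palindromePartition : Prop := ∀ (s : String) (k : Int), Dom_palindromePartition s k → Pre_palindromePartition s k → Spec_palindromePartition s k (palindromePartition s k)

-- ===== LEMMAS AND PROOFS =====

lemma pvSet_length (f : List Int) (r v : Int) : (pvSet f r v).length = f.length := by
  simp [pvSet]

lemma pvGet_set_self (f : List Int) (r v : Int) (hr : 0 ≤ r) (hlt : r.toNat < f.length) :
    pvGet (pvSet f r v) r = v := by
  simp [pvGet, pvSet, PySem.List.pyGetD_of_nonneg _ _ hr, List.getD, hlt]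

lemma pvGet_set_ne (f : List Int) (r j v : Int) (hr : 0 ≤ r) (hj : 0 ≤ j) (hne : j ≠ r) :
    pvGet (pvSet f r v) j = pvGet f j := by
  have h : r.toNat ≠ j.toNat := by omega
  simp [pvGet, pvSet, PySem.List.pyGetD_of_nonneg _ _ hj, List.getD, List.getElem?_set_ne h]

lemma pvGet_neg_one (f : List Int) (hf : 1 ≤ f.length) :
    pvGet f (-1) = pvGet f ((f.length : Int) - 1) := by
  have h2 : -(f.length:Int) ≤ -1 := by omega
  have h4 : (f.length:Int) - 1 < (f.length:Int) := by omega
  have hidx : f.length - (-(-1 : Int)).toNat = ((f.length : Int) - 1).toNat := by omega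
  simp only [pvGet, PySem.List.pyGetD, PySem.List.pyGet?, PySem.List.pyIdx?]
  norm_num [h2, h4, hidx, hf]

-- the inner write loop (over r) of A's partition DP, and the outer loop (over i), as named steps
def pvStepR (mc : List (List Int)) (i : Int) (f : List Int) (r : Int) : List Int :=
  pvSet f r ((PySem.List.min? ((PySem.List.pyRange i (r+1) 1).foldl
    (fun ans l => ans ++ [pvGet f (l-1) + pvMget mc l r]) []) (fun x => x)).getD 0)

def pvStepI (mc : List (List Int)) (n k : Int) (f : List Int) (i : Int) : List Int :=
  (PySem.List.pyRange (n-k+i) (i-1) (-1)).foldl (pvStepR mc i) f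

lemma pvSolve_base (mc : List (List Int)) (r i : Int) (h : i ≤ 1) :
    pvSolve mc r i = pvMget mc 0 r := by
  rw [pvSolve]; simp [h]

lemma pvSolve_step (mc : List (List Int)) (r i : Int) (h : 2 ≤ i) :
    pvSolve mc r i = (PySem.List.min? ((PySem.List.pyRange (i-1) (r+1) 1).map
      (fun l => pvSolve mc (l-1) (i-1) + pvMget mc l r)) (fun x => x)).getD 0 := by
  rw [pvSolve]; simp [show ¬ i ≤ 1 by omega]

-- descending write loop: positions > r already hold the parts = i+1 values, positions ≤ r still
-- hold the parts = i values of f0; each step writes position r from reads strictly below r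
lemma innerAux (mc : List (List Int)) (n k i : Int) (f0 : List Int)
    (h1 : 1 ≤ i) (hik : i ≤ k - 1) (_hkn : k ≤ n)
    (hInv : ∀ j, 0 ≤ j → i-1 ≤ j → j ≤ n-k+i-1 → pvGet f0 j = pvSolve mc j i) :
    ∀ (cnt : Nat) (r : Int) (fs : List Int), r - (i-1) = cnt → i-1 ≤ r → r ≤ n-k+i →
      ((fs.length : Int) = n) →
      (∀ j, 0 ≤ j → j ≤ r → pvGet fs j = pvGet f0 j) →
      (∀ j, r < j → j ≤ n-k+i → pvGet fs j = pvSolve mc j (i+1)) →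
      ((((PySem.List.pyRange r (i-1) (-1)).foldl (pvStepR mc i) fs).length : Int) = n) ∧
      (∀ j, i ≤ j → j ≤ n-k+i →
        pvGet ((PySem.List.pyRange r (i-1) (-1)).foldl (pvStepR mc i) fs) j = pvSolve mc j (i+1)) := by
  intro cnt
  induction cnt with
  | zero =>
    intro r fs hcnt hlo hhi hlen h2 h3
    have hr : r = i - 1 := by omega
    rw [hr, PySem.List.pyRange_neg_one_eq_nil le_rfl]
    exact ⟨hlen, fun j hji hjh => h3 j (by omega) hjh⟩
  | succ cnt ih =>
    intro r fs hcnt hlo hhi hlen h2 h3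
    have hlt : i - 1 < r := by omega
    rw [PySem.List.pyRange_neg_one_cons hlt, List.foldl_cons]
    have hans : (PySem.List.pyRange i (r+1) 1).foldl
        (fun ans l => ans ++ [pvGet fs (l-1) + pvMget mc l r]) []
        = (PySem.List.pyRange i (r+1) 1).map (fun l => pvGet fs (l-1) + pvMget mc l r) := by
      simpa using PySem.List.foldl_append_singleton_eq_map
        (fun l => pvGet fs (l-1) + pvMget mc l r) (PySem.List.pyRange i (r+1) 1) []
    have hmap : (PySem.List.pyRange i (r+1) 1).map (fun l => pvGet fs (l-1) + pvMget mc l r)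
        = (PySem.List.pyRange i (r+1) 1).map (fun l => pvSolve mc (l-1) i + pvMget mc l r) := by
      apply List.map_congr_left
      intro l hl
      rw [PySem.List.mem_pyRange_one] at hl
      have e1 : pvGet fs (l-1) = pvGet f0 (l-1) := h2 (l-1) (by omega) (by omega)
      have e2 : pvGet f0 (l-1) = pvSolve mc (l-1) i := hInv (l-1) (by omega) (by omega) (by omega)
      rw [e1, e2]
    have hval : pvStepR mc i fs r = pvSet fs r (pvSolve mc r (i+1)) := by
      rw [pvStepR, hans, hmap, pvSolve_step mc r (i+1) (by omega)]
      norm_num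
    rw [hval]
    have hwr : 0 ≤ r := by omega
    have hrlt : r.toNat < fs.length := by omega
    refine ih (r-1) (pvSet fs r (pvSolve mc r (i+1))) (by omega) (by omega) (by omega)
      (by rw [pvSet_length]; exact hlen) ?_ ?_
    · intro j hj0 hjr
      rw [pvGet_set_ne fs r j _ hwr hj0 (by omega)]
      exact h2 j hj0 (by omega)
    · intro j hjl hjh
      by_cases hje : j = r
      · rw [hje, pvGet_set_self fs r _ hwr hrlt]
      · rw [pvGet_set_ne fs r j _ hwr (by omega) hje]
        exact h3 j (by omega) hjh

lemma innerLoop (mc : List (List Int)) (n k i : Int) (f0 : List Int)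
    (h1 : 1 ≤ i) (hik : i ≤ k - 1) (hkn : k ≤ n) (hlen : (f0.length : Int) = n)
    (hInv : ∀ j, 0 ≤ j → i-1 ≤ j → j ≤ n-k+i-1 → pvGet f0 j = pvSolve mc j i) :
    (((pvStepI mc n k f0 i).length : Int) = n) ∧
    (∀ j, 0 ≤ j → i ≤ j → j ≤ n-k+i → pvGet (pvStepI mc n k f0 i) j = pvSolve mc j (i+1)) := by
  have h := innerAux mc n k i f0 h1 hik hkn hInv (n-k+i - (i-1)).toNat (n-k+i) f0
    (by omega) (by omega) (by omega) hlen (fun j _ _ => rfl) (fun j hj1 hj2 => by omega)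
  exact ⟨h.1, fun j _ hji hjh => h.2 j hji hjh⟩

-- after the outer loop from i, every position in the final window [k-1, n-1] holds the
-- parts = k value; invariant: entering iteration i, the window of iteration i-1 is in place
lemma outerLoop (mc : List (List Int)) (n k : Int) (hkn : k ≤ n) :
    ∀ (cnt : Nat) (i : Int) (f : List Int), k - i = cnt → 1 ≤ i → i ≤ k →
      ((f.length : Int) = n) →
      (∀ j, 0 ≤ j → i-1 ≤ j → j ≤ n-k+i-1 → pvGet f j = pvSolve mc j i) →
      ((((PySem.List.pyRange i k 1).foldl (pvStepI mc n k) f).length : Int) = n) ∧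
      (∀ j, 0 ≤ j → k-1 ≤ j → j ≤ n-1 →
        pvGet ((PySem.List.pyRange i k 1).foldl (pvStepI mc n k) f) j = pvSolve mc j k) := by
  intro cnt
  induction cnt with
  | zero =>
    intro i f hcnt h1 hik hlen hInv
    have hi : i = k := by omega
    subst hi
    rw [PySem.List.pyRange_one_eq_nil le_rfl]
    exact ⟨hlen, fun j hj0 hj1 hj2 => hInv j hj0 (by omega) (by omega)⟩
  | succ cnt ih =>
    intro i f hcnt h1 hik hlen hInv
    have hlt : i < k := by omega
    rw [PySem.List.pyRange_one_cons hlt, List.foldl_cons]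
    obtain ⟨hlen', hwin⟩ := innerLoop mc n k i f h1 (by omega) hkn hlen hInv
    exact ih (i+1) (pvStepI mc n k f i) (by omega) (by omega) (by omega) hlen'
      (fun j hj0 hj1 hj2 => hwin j hj0 (by omega) (by omega))

-- shape: n rows of length n, preserved by every write the builders perform
def pvShape (m : List (List Int)) (N : Nat) : Prop := m.length = N ∧ ∀ row ∈ m, row.length = N

lemma pvShape_mset (m : List (List Int)) (N : Nat) (i j v : Int)
    (hm : pvShape m N) (hi0 : 0 ≤ i) (hiN : i < (N : Int)) : pvShape (pvMset m i j v) N := by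
  obtain ⟨hlen, hrow⟩ := hm
  refine ⟨by simp [pvMset, hlen], ?_⟩
  intro row hmem
  rcases List.mem_or_eq_of_mem_set hmem with h | h
  · exact hrow row h
  · rw [h, pvSet_length]
    have hidx : i < (m.length : Int) := by omega
    rw [pvRow, PySem.List.pyGetD_eq_getElem m [] hi0 hidx]
    exact hrow _ (List.getElem_mem _)

lemma pvShape_buildA (cs : List Char) : pvShape (pvBuildA cs) cs.length := by
  have hm0eq : (PySem.List.pyRange 0 (cs.length : Int) 1).foldl
      (fun acc _ => acc ++ [List.replicate cs.length (0:Int)]) []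
      = (PySem.List.pyRange 0 (cs.length : Int) 1).map (fun _ => List.replicate cs.length (0:Int)) := by
    simpa using PySem.List.foldl_append_singleton_eq_map
      (fun (_ : Int) => List.replicate cs.length (0:Int)) (PySem.List.pyRange 0 (cs.length : Int) 1) []
  have hm0 : pvShape ((PySem.List.pyRange 0 (cs.length : Int) 1).foldl
      (fun acc _ => acc ++ [List.replicate cs.length (0:Int)]) []) cs.length := by
    rw [hm0eq]
    refine ⟨by simp [PySem.List.length_pyRange_one], ?_⟩
    intro row hrow
    simp only [List.mem_map] at hrow
    obtain ⟨_, _, h⟩ := hrow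
    simp [← h]
  unfold pvBuildA
  refine List.foldlRecOn (motive := fun m => pvShape m cs.length) _ _ hm0 ?_
  intro m hm i hi
  rw [PySem.List.mem_pyRange_neg_one] at hi
  refine List.foldlRecOn (motive := fun m => pvShape m cs.length) _ _ hm ?_
  intro m' hm' j _
  split_ifs with h
  · exact pvShape_mset m' cs.length i j _ hm' (by omega) (by omega)
  · exact pvShape_mset m' cs.length i j _ hm' (by omega) (by omega)

lemma pvBuild_eq (cs : List Char) : pvBuildB cs = pvBuildA cs := by
  unfold pvBuildA pvBuildB
  congr 1
  funext m i
  congr 1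
  funext m' j
  split_ifs with h <;> simp

-- ===== VERDICT (by name: the statement is the Claim_ definition above) =====
theorem palindromePartition_spec : Claim_equal_palindromePartition := by
  intro s k _ hpre
  obtain ⟨hn1, hkn⟩ := hpre
  rw [PySem.Str.len_eq] at hn1 hkn
  unfold Spec_palindromePartition
  show pvGet ((PySem.List.pyRange 1 k 1).foldl
      (pvStepI (pvBuildA s.toList) ((s.toList.length : Int)) k)
      (pvRow (pvBuildA s.toList) 0)) (-1)
    = pvSolve (pvBuildB s.toList) ((s.toList.length : Int) - 1) k
  rw [pvBuild_eq]
  have hshape := pvShape_buildA s.toList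
  have hrow0 : ((pvRow (pvBuildA s.toList) 0).length : Int) = (s.toList.length : Int) := by
    have h0 : (0:Int) < ((pvBuildA s.toList).length : Int) := by rw [hshape.1]; omega
    rw [pvRow, PySem.List.pyGetD_eq_getElem _ [] le_rfl h0]
    rw [hshape.2 _ (List.getElem_mem _)]
  by_cases hk1 : k ≤ 0
  · rw [PySem.List.pyRange_one_eq_nil (by omega : k ≤ 1)]
    simp only [List.foldl_nil]
    rw [pvSolve_base _ _ _ (by omega : k ≤ 1)]
    rw [show pvMget (pvBuildA s.toList) 0 ((s.toList.length : Int) - 1)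
        = pvGet (pvRow (pvBuildA s.toList) 0) ((s.toList.length : Int) - 1) from rfl]
    rw [pvGet_neg_one _ (by omega : 1 ≤ (pvRow (pvBuildA s.toList) 0).length), hrow0]
  · have hinit : ∀ j, 0 ≤ j → (1:Int)-1 ≤ j → j ≤ (s.toList.length : Int)-k+1-1 →
        pvGet (pvRow (pvBuildA s.toList) 0) j = pvSolve (pvBuildA s.toList) j 1 := by
      intro j _ _ _
      rw [pvSolve_base _ _ _ le_rfl]
      rfl
    obtain ⟨hlen', hwin⟩ := outerLoop (pvBuildA s.toList) ((s.toList.length : Int)) k hkn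
      (k-1).toNat 1 (pvRow (pvBuildA s.toList) 0) (by omega) le_rfl (by omega) hrow0 hinit
    rw [pvGet_neg_one _ (by omega : 1 ≤ ((PySem.List.pyRange 1 k 1).foldl
      (pvStepI (pvBuildA s.toList) ((s.toList.length : Int)) k) (pvRow (pvBuildA s.toList) 0)).length), hlen']
    exact hwin ((s.toList.length : Int) - 1) (by omega) (by omega) (by omega)
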